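-- pv_equiv track=rewrite | github.com/henrysiegel17/Knight-Exchange-Puzzle | reduction.py | glue_chessboards
-- ===== SOURCE A (Python) =====
-- def glue_chessboards(result, tile_size):
--     # result: dict {(x,y): 9x9 matrix}
--
--     xs = [x for (x, y) in result.keys()]
--     ys = [y for (x, y) in result.keys()]
--
--     width  = max(xs) + 1
--     height = max(ys) + 1
--
--     final = [[0] * (width * tile_size) for _ in range(height * tile_size)]
--
--     for (x, y), tile in result.items():
--         base_x = x * tile_size
--         base_y = y * tile_size
--
--         for i in range(tile_size):
--             for j in range(tile_size):
--                 final[base_y + j][base_x + i] = tile[j][i]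
--
--     return final
-- ===== SOURCE B (Python) =====
-- def glue_chessboards(result, tile_size):
--     # Build the glued board row by row, concatenating one tile-row slice
--     # (or a zero block for a missing tile) per block column.
--     xs = [x for (x, y) in result.keys()]
--     ys = [y for (x, y) in result.keys()]
--
--     width  = max(xs) + 1
--     height = max(ys) + 1
--
--     final = []
--     for y in range(height):
--         for j in range(tile_size):
--             row = []
--             for x in range(width):
--                 tile = result.get((x, y))
--                 if tile is None:
--                     row += [0] * tile_size
--                 else:
--                     row += tile[j][:tile_size]
--             final.append(row)
--     return final
-- ===== Notes on version B (the rewrite author's own statement) =====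
-- stated objective: alternative
-- what changed: Replaces A's preallocated zero grid mutated by scattered nested index writes per dict item with direct row-by-row construction: each global row is built by concatenating, per block column, the key's tile-row slice or a zero block for a missing tile.
-- outside the precondition, e.g. on glue_chessboards({(1, 0): [[5]], (-1, 0): [[7]]}, 1): A returns [[0, 7]], B returns [[0, 5]]; on glue_chessboards({(-2, -2): [[1]]}, -2): A returns [[0, 0], [0, 0]], B returns []
import Mathlib
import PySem

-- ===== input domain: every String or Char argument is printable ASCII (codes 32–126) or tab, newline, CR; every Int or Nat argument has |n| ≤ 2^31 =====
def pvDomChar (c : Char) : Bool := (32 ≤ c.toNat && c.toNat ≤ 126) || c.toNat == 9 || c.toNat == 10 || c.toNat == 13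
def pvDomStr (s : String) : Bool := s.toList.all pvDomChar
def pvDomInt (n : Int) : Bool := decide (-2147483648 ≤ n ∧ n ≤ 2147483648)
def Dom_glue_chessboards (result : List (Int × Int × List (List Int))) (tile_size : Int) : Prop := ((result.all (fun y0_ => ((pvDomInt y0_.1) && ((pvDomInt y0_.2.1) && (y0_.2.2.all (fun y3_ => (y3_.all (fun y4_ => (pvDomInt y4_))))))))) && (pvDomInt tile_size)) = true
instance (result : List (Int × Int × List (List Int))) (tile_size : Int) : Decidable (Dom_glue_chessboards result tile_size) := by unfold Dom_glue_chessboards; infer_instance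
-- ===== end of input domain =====

-- B assembles each output row directly by concatenating per-block-column tile-row slices
-- (zero blocks for missing keys) instead of A's preallocated grid mutated by nested index writes.

-- ===== PORT A =====

-- final[r][c] = v with Python index semantics (negative wraps); where Python would raise
-- IndexError (index out of range — excluded by Pre_) this returns the grid unchanged.
def pySetCell (g : List (List Int)) (r c : Int) (v : Int) : List (List Int) :=
  match PySem.List.pyGet? g r with
  | none => g
  | some row =>
    match PySem.List.pySet? row c v with
    | none => g
    | some row' => PySem.List.pySetD g r row'

-- the body of A's 'for (x, y), tile in result.items(): …' loop
def writeTileA (tile_size : Int) (g : List (List Int)) (it : (Int × Int) × List (List Int)) :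
    List (List Int) :=
  let base_x := it.1.1 * tile_size
  let base_y := it.1.2 * tile_size
  (PySem.List.pyRange 0 tile_size).foldl (fun g i =>
    (PySem.List.pyRange 0 tile_size).foldl (fun g j =>
      -- tile[j][i]: Python raises IndexError if out of range (excluded by Pre_)
      pySetCell g (base_y + j) (base_x + i)
        (PySem.List.pyGetD (PySem.List.pyGetD it.2 j []) i 0)) g) g

def glue_chessboards (result : List (Int × Int × List (List Int))) (tile_size : Int) :
    List (List Int) :=
  let d := PySem.Dict.ofList (result.map (fun p => ((p.1, p.2.1), p.2.2)))
  let xs := d.keys.map (fun k => k.1)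
  let ys := d.keys.map (fun k => k.2)
  match PySem.List.max? xs (fun v => v), PySem.List.max? ys (fun v => v) with
  | some mx, some my =>
    let width := mx + 1
    let height := my + 1
    let final : List (List Int) :=
      List.replicate (height * tile_size).toNat (List.replicate (width * tile_size).toNat 0)
    d.items.foldl (writeTileA tile_size) final
  | _, _ => []  -- max([]) raises ValueError: empty dict, excluded by Pre_

-- ===== PORT B =====

def glue_chessboards_alt (result : List (Int × Int × List (List Int))) (tile_size : Int) :
    List (List Int) :=
  let d := PySem.Dict.ofList (result.map (fun p => ((p.1, p.2.1), p.2.2)))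
  let xs := d.keys.map (fun k => k.1)
  let ys := d.keys.map (fun k => k.2)
  match PySem.List.max? xs (fun v => v) with
  | none => []  -- max([]) raises ValueError: empty dict, excluded by Pre_
  | some mx =>
  match PySem.List.max? ys (fun v => v) with
  | none => []
  | some my =>
    let width := mx + 1
    let height := my + 1
    (PySem.List.pyRange 0 height).foldl (fun final y =>
      (PySem.List.pyRange 0 tile_size).foldl (fun final j =>
        let row := (PySem.List.pyRange 0 width).foldl (fun row x =>
          match d.get? (x, y) with
          | none => row ++ List.replicate tile_size.toNat 0     -- [0] * tile_size
          | some tile =>                                         -- tile[j][:tile_size]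
              row ++ PySem.List.slice (PySem.List.pyGetD tile j []) none (some tile_size)) []
        final ++ [row]) final) []

-- ===== PRECONDITION & SPEC =====
-- Pre_ restricts to the natural domain: a nonempty dict whose keys are nonnegative and whose
-- tiles are at least tile_size × tile_size whenever tile_size > 0 (and, for the degenerate
-- tile_size < 0, some block-row ≥ -1); outside it A raises ValueError/IndexError, or writes
-- tiles at wrapped positions via Python's negative-index wraparound, or (negative tile_size
-- with all-negative rows) returns an accidental zero grid, while B ignores such tiles.
def Pre_glue_chessboards (result : List (Int × Int × List (List Int))) (tile_size : Int) : Prop :=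
  result ≠ [] ∧
  (tile_size < 0 → ∃ p ∈ result, -1 ≤ p.2.1) ∧
  (∀ p ∈ (PySem.Dict.ofList (result.map (fun q => ((q.1, q.2.1), q.2.2)))).items,
    0 < tile_size →
      0 ≤ p.1.1 ∧ 0 ≤ p.1.2 ∧ tile_size ≤ (p.2.length : Int) ∧
      ∀ row ∈ p.2.take tile_size.toNat, tile_size ≤ (row.length : Int))

instance (result : List (Int × Int × List (List Int))) (tile_size : Int) :
    Decidable (Pre_glue_chessboards result tile_size) := by
  unfold Pre_glue_chessboards; infer_instance

def pvWitness_glue_chessboards : (List (Int × Int × List (List Int))) × Int :=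
  ([(0, 0, [[1, 2], [3, 4]]), (1, 0, [[5, 6], [7, 8]])], 2)

def Spec_glue_chessboards (result : List (Int × Int × List (List Int))) (tile_size : Int) (out : List (List Int)) : Prop := out = glue_chessboards_alt result tile_size
instance (result : List (Int × Int × List (List Int))) (tile_size : Int) (out : List (List Int)) : Decidable (Spec_glue_chessboards result tile_size out) := by unfold Spec_glue_chessboards; infer_instance

-- ===== CLAIM (what is proved, stated in full; the proofs are below) =====
def Claim_equal_glue_chessboards : Prop := ∀ (result : List (Int × Int × List (List Int))) (tile_size : Int), Dom_glue_chessboards result tile_size → Pre_glue_chessboards result tile_size → Spec_glue_chessboards result tile_size (glue_chessboards result tile_size)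

-- ===== LEMMAS AND PROOFS =====

def cellGet (g : List (List Int)) (r c : Nat) : Int := (g.getD r []).getD c 0

def natSet2 (g : List (List Int)) (r c : Nat) (v : Int) : List (List Int) :=
  g.set r ((g.getD r []).set c v)

theorem getD_set' {α : Type} (l : List α) (i : Nat) (a : α) (j : Nat) (d : α) :
    (l.set i a).getD j d = if i = j ∧ i < l.length then a else l.getD j d := by
  simp only [List.getD_eq_getElem?_getD, List.getElem?_set]
  split_ifs with h1 <;> simp_all
  omega

theorem natSet2_length (g : List (List Int)) (r c : Nat) (v : Int) :
    (natSet2 g r c v).length = g.length := by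
  simp [natSet2]

theorem natSet2_rowlen (g : List (List Int)) (r c : Nat) (v : Int) (r' : Nat) :
    ((natSet2 g r c v).getD r' []).length = (g.getD r' []).length := by
  unfold natSet2
  rw [getD_set']
  split_ifs with h
  · rw [List.length_set, h.1]
  · rfl

theorem cellGet_natSet2 (g : List (List Int)) (r c : Nat) (v : Int) (r' c' : Nat) :
    cellGet (natSet2 g r c v) r' c' =
      if r = r' ∧ c = c' ∧ r < g.length ∧ c < (g.getD r []).length then v
      else cellGet g r' c' := by
  unfold cellGet natSet2
  rw [getD_set']
  split_ifs with h1 h2 h2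
  · obtain ⟨hr, hrl⟩ := h1
    rw [getD_set']
    subst hr
    rw [List.getD_eq_getElem g [] hrl] at h2 ⊢
    split_ifs with h3 <;> simp_all
  · obtain ⟨hr, hrl⟩ := h1
    rw [getD_set']
    subst hr
    rw [List.getD_eq_getElem g [] hrl] at h2 ⊢
    split_ifs with h3 <;> simp_all
    omega
  · exact absurd ⟨h2.1, h2.2.2.1⟩ h1
  · rfl

theorem strip_foldl (b a : Nat) (w : Nat → Int) (n : Nat) (g : List (List Int)) :
    (((List.range n).foldl (fun g j => natSet2 g (b + j) a (w j)) g).length = g.length)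
  ∧ (∀ r', (((List.range n).foldl (fun g j => natSet2 g (b + j) a (w j)) g).getD r' []).length
        = (g.getD r' []).length)
  ∧ (∀ r' c', cellGet ((List.range n).foldl (fun g j => natSet2 g (b + j) a (w j)) g) r' c' =
      if b ≤ r' ∧ r' < b + n ∧ a = c' ∧ r' < g.length ∧ a < (g.getD r' []).length
      then w (r' - b) else cellGet g r' c') := by
  induction n with
  | zero =>
    refine ⟨rfl, fun r' => rfl, fun r' c' => ?_⟩
    split_ifs with h
    · omega
    · rfl
  | succ n ih =>
    rw [List.range_succ, List.foldl_append]
    obtain ⟨ihlen, ihrow, ihcell⟩ := ih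
    set prev := (List.range n).foldl (fun g j => natSet2 g (b + j) a (w j)) g with hprev
    simp only [List.foldl_cons, List.foldl_nil]
    refine ⟨by rw [natSet2_length, ihlen], fun r' => by rw [natSet2_rowlen, ihrow], fun r' c' => ?_⟩
    rw [cellGet_natSet2, ihlen, ihrow, ihcell r' c']
    by_cases h1 : b + n = r' ∧ a = c' ∧ b + n < g.length ∧ a < (g.getD (b + n) []).length
    · rw [if_pos h1]
      obtain ⟨hr, hc, hl, hrl⟩ := h1
      subst hr
      rw [if_pos (⟨by omega, by omega, hc, hl, hrl⟩ :
        b ≤ b + n ∧ b + n < b + (n+1) ∧ a = c' ∧ b + n < g.length ∧ a < (g.getD (b+n) []).length)]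
      congr 1
      omega
    · rw [if_neg h1]
      by_cases h2 : b ≤ r' ∧ r' < b + n ∧ a = c' ∧ r' < g.length ∧ a < (g.getD r' []).length
      · rw [if_pos h2, if_pos ⟨h2.1, by omega, h2.2.2⟩]
      · rw [if_neg h2]
        rw [if_neg ?_]
        intro h3
        by_cases hr : r' = b + n
        · subst hr
          exact h1 ⟨rfl, h3.2.2.1, h3.2.2.2⟩
        · exact h2 ⟨h3.1, by omega, h3.2.2⟩

theorem tile_foldl (bx by_ ts : Nat) (t : List (List Int)) (n : Nat) (g : List (List Int)) :
    (((List.range n).foldl (fun g i => (List.range ts).foldl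
        (fun g j => natSet2 g (by_ + j) (bx + i) ((t.getD j []).getD i 0)) g) g).length = g.length)
  ∧ (∀ r', (((List.range n).foldl (fun g i => (List.range ts).foldl
        (fun g j => natSet2 g (by_ + j) (bx + i) ((t.getD j []).getD i 0)) g) g).getD r' []).length
        = (g.getD r' []).length)
  ∧ (∀ r' c', cellGet ((List.range n).foldl (fun g i => (List.range ts).foldl
        (fun g j => natSet2 g (by_ + j) (bx + i) ((t.getD j []).getD i 0)) g) g) r' c' =
      if by_ ≤ r' ∧ r' < by_ + ts ∧ bx ≤ c' ∧ c' < bx + n ∧ r' < g.length ∧ c' < (g.getD r' []).length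
      then (t.getD (r' - by_) []).getD (c' - bx) 0 else cellGet g r' c') := by
  induction n with
  | zero =>
    refine ⟨rfl, fun r' => rfl, fun r' c' => ?_⟩
    split_ifs with h
    · omega
    · rfl
  | succ n ih =>
    rw [List.range_succ, List.foldl_append]
    obtain ⟨ihlen, ihrow, ihcell⟩ := ih
    set prev := (List.range n).foldl (fun g i => (List.range ts).foldl
        (fun g j => natSet2 g (by_ + j) (bx + i) ((t.getD j []).getD i 0)) g) g with hprev
    simp only [List.foldl_cons, List.foldl_nil]
    obtain ⟨slen, srow, scell⟩ := strip_foldl by_ (bx + n) (fun j => (t.getD j []).getD n 0) ts prev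
    refine ⟨by rw [slen, ihlen], fun r' => by rw [srow, ihrow], fun r' c' => ?_⟩
    rw [scell r' c', ihlen, ihrow, ihcell r' c']
    by_cases h1 : by_ ≤ r' ∧ r' < by_ + ts ∧ bx + n = c' ∧ r' < g.length ∧ bx + n < (g.getD r' []).length
    · rw [if_pos h1]
      rw [if_pos (⟨h1.1, h1.2.1, by omega, by omega, h1.2.2.2.1, by omega⟩ :
        by_ ≤ r' ∧ r' < by_ + ts ∧ bx ≤ c' ∧ c' < bx + (n+1) ∧ r' < g.length ∧ c' < (g.getD r' []).length)]
      congr 1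
      omega
    · rw [if_neg h1]
      by_cases h2 : by_ ≤ r' ∧ r' < by_ + ts ∧ bx ≤ c' ∧ c' < bx + n ∧ r' < g.length ∧ c' < (g.getD r' []).length
      · rw [if_pos h2, if_pos ⟨h2.1, h2.2.1, h2.2.2.1, by omega, h2.2.2.2.2⟩]
      · rw [if_neg h2, if_neg ?_]
        intro h3
        by_cases hc : c' = bx + n
        · exact h1 ⟨h3.1, h3.2.1, by omega, h3.2.2.2.2.1, by omega⟩
        · exact h2 ⟨h3.1, h3.2.1, h3.2.2.1, by omega, h3.2.2.2.2⟩

theorem eq_of_getD {α : Type} (d : α) (l l' : List α) (hl : l.length = l'.length)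
    (h : ∀ i, i < l.length → l.getD i d = l'.getD i d) : l = l' := by
  refine List.ext_getElem hl (fun i h1 h2 => ?_)
  have := h i h1
  rwa [List.getD_eq_getElem l d h1, List.getD_eq_getElem l' d h2] at this

theorem getD_map_range' {α : Type} (d : α) (f : Nat → α) (n i : Nat) (h : i < n) :
    ((List.range n).map f).getD i d = f i := by
  rw [List.getD_eq_getElem _ d (by simpa using h)]
  simp [List.getElem_map, List.getElem_range]

theorem find?_eq_none_of_not_mem_keys (L : List ((Int × Int) × List (List Int)))
    (k : Int × Int) (h : k ∉ L.map (fun p => p.1)) :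
    L.find? (fun p => p.1 == k) = none := by
  rw [List.find?_eq_none]
  intro p hp hbeq
  exact h (List.mem_map.mpr ⟨p, hp, (by simpa using hbeq)⟩)

theorem blockGetD {α : Type} (dflt : α) (f : Nat → List α) (t : Nat)
    (hf : ∀ k, (f k).length = t) (n : Nat) :
    (((List.range n).flatMap f).length = n * t)
  ∧ (∀ idx, idx < n * t →
      ((List.range n).flatMap f).getD idx dflt = (f (idx / t)).getD (idx % t) dflt) := by
  induction n with
  | zero => exact ⟨by simp, fun idx h => by omega⟩
  | succ n ih =>
    obtain ⟨ihlen, ihget⟩ := ih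
    rw [List.range_succ]
    have hl : ((List.range n).flatMap f ++ f n).length = (n+1) * t := by
      simp [ihlen, hf n]; ring
    constructor
    · simpa using hl
    · intro idx hidx
      simp only [List.flatMap_append, List.flatMap_cons, List.flatMap_nil, List.append_nil]
      by_cases hc : idx < n * t
      · rw [List.getD_eq_getElem?_getD, List.getElem?_append_left (by rw [ihlen]; exact hc),
            ← List.getD_eq_getElem?_getD, ihget idx hc]
      · have hnt : (n + 1) * t = n * t + t := by ring
        rw [hnt] at hidx
        have hdiv : idx / t = n := Nat.div_eq_of_lt_le (by omega) (by rw [hnt]; omega)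
        have hmod : idx % t = idx - n * t := by
          conv_lhs => rw [show idx = (idx - n * t) + n * t by omega]
          rw [Nat.add_mul_mod_self_right]
          exact Nat.mod_eq_of_lt (by omega)
        rw [List.getD_eq_getElem?_getD, List.getElem?_append_right (by rw [ihlen]; omega),
            ihlen, ← List.getD_eq_getElem?_getD, hdiv, hmod]

def writeNat (ts : Nat) (g : List (List Int)) (p : (Int × Int) × List (List Int)) :
    List (List Int) :=
  (List.range ts).foldl (fun g i =>
    (List.range ts).foldl (fun g j =>
      natSet2 g (p.1.2.toNat * ts + j) (p.1.1.toNat * ts + i) ((p.2.getD j []).getD i 0)) g) g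

theorem pySetCell_eq_natSet2 (g : List (List Int)) (r c : Int) (v : Int)
    (hr : 0 ≤ r) (hc : 0 ≤ c) :
    pySetCell g r c v = natSet2 g r.toNat c.toNat v := by
  unfold pySetCell natSet2 PySem.List.pySet? PySem.List.pyIdx?
  rw [PySem.List.pyGet?_of_nonneg g hr]
  cases hrow : g[r.toNat]? with
  | none =>
    have hlen : g.length ≤ r.toNat := by
      by_contra h
      rw [List.getElem?_eq_getElem (by omega)] at hrow
      exact absurd hrow (by simp)
    dsimp only
    rw [List.set_eq_of_length_le hlen]
  | some row =>
    have hlt : r.toNat < g.length := by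
      by_contra h
      rw [List.getElem?_eq_none (by omega)] at hrow
      exact absurd hrow (by simp)
    have hgr : g[r.toNat] = row := by
      have h2 := List.getElem?_eq_getElem (l := g) (i := r.toNat) hlt
      rw [hrow] at h2
      exact Option.some_inj.mp h2.symm
    have hrowD : g.getD r.toNat [] = row := by
      rw [List.getD_eq_getElem?_getD, hrow]; rfl
    dsimp only
    rw [if_pos hc]
    by_cases hcl : c < (row.length : Int)
    · rw [if_pos hcl]
      dsimp only [Option.map_some]
      rw [PySem.List.pySetD_of_nonneg _ _ hr, hrowD]
    · rw [if_neg hcl]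
      dsimp only [Option.map_none]
      rw [hrowD, List.set_eq_of_length_le (show row.length ≤ c.toNat by omega),
          ← hgr, List.set_getElem_self hlt]

theorem writeTileA_eq_writeNat (ts : Int) (hts : 0 ≤ ts) (g : List (List Int))
    (p : (Int × Int) × List (List Int)) (hx : 0 ≤ p.1.1) (hy : 0 ≤ p.1.2) :
    writeTileA ts g p = writeNat ts.toNat g p := by
  unfold writeTileA writeNat
  rw [PySem.List.pyRange_zero, List.foldl_map]
  congr 1
  funext g i
  rw [List.foldl_map]
  congr 1
  funext g j
  rw [pySetCell_eq_natSet2 _ _ _ _ (by positivity) (by positivity)]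
  have key1 : ((p.1.2.toNat * ts.toNat : Nat) : Int) = p.1.2 * ts := by
    push_cast
    rw [Int.toNat_of_nonneg hy, Int.toNat_of_nonneg hts]
  have key2 : ((p.1.1.toNat * ts.toNat : Nat) : Int) = p.1.1 * ts := by
    push_cast
    rw [Int.toNat_of_nonneg hx, Int.toNat_of_nonneg hts]
  have h1 : (p.1.2 * ts + (j : Int)).toNat = p.1.2.toNat * ts.toNat + j := by omega
  have h2 : (p.1.1 * ts + (i : Int)).toNat = p.1.1.toNat * ts.toNat + i := by omega
  rw [h1, h2]
  congr 1
  simp [PySem.List.pyGetD_natCast]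

theorem items_foldl (ts : Nat) (hts : 0 < ts) (L : List ((Int × Int) × List (List Int)))
    (g : List (List Int)) (hnd : (L.map (fun p => p.1)).Nodup)
    (hnn : ∀ p ∈ L, 0 ≤ p.1.1 ∧ 0 ≤ p.1.2) :
    ((L.foldl (writeNat ts) g).length = g.length)
  ∧ (∀ r', ((L.foldl (writeNat ts) g).getD r' []).length = (g.getD r' []).length)
  ∧ (∀ r' c', r' < g.length → c' < (g.getD r' []).length →
      cellGet (L.foldl (writeNat ts) g) r' c' =
        match L.find? (fun p => p.1 == (((c' / ts : Nat) : Int), ((r' / ts : Nat) : Int))) with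
        | some p => (p.2.getD (r' % ts) []).getD (c' % ts) 0
        | none => cellGet g r' c') := by
  induction L generalizing g with
  | nil => exact ⟨rfl, fun _ => rfl, fun _ _ _ _ => rfl⟩
  | cons p L ih =>
    simp only [List.foldl_cons, List.find?_cons]
    have hnd' : (L.map (fun p => p.1)).Nodup := (List.nodup_cons.mp hnd).2
    have hnn' : ∀ q ∈ L, 0 ≤ q.1.1 ∧ 0 ≤ q.1.2 := fun q hq => hnn q (List.mem_cons_of_mem p hq)
    obtain ⟨ihlen, ihrow, ihcell⟩ := ih (writeNat ts g p) hnd' hnn'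
    obtain ⟨tlen, trow, tcell⟩ := tile_foldl (p.1.1.toNat * ts) (p.1.2.toNat * ts) ts p.2 ts g
    have wlen : (writeNat ts g p).length = g.length := tlen
    have wrow : ∀ r', ((writeNat ts g p).getD r' []).length = (g.getD r' []).length := trow
    refine ⟨by rw [ihlen, wlen], fun r' => by rw [ihrow, wrow], fun r' c' hr hc => ?_⟩
    have hnnp := hnn p (List.mem_cons_self)
    -- decompose r' and c'
    have hdm_r := Nat.div_add_mod r' ts
    have hdm_c := Nat.div_add_mod c' ts
    have hmlt_r : r' % ts < ts := Nat.mod_lt _ hts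
    have hmlt_c : c' % ts < ts := Nat.mod_lt _ hts
    rw [ihcell r' c' (by rw [wlen]; exact hr) (by rw [wrow]; exact hc)]
    by_cases hkey : p.1 = (((c' / ts : Nat) : Int), ((r' / ts : Nat) : Int))
    · have hbeq : (p.1 == (((c' / ts : Nat) : Int), ((r' / ts : Nat) : Int))) = true := by
        simp [hkey]
      rw [hbeq]
      have hfind : L.find? (fun q => q.1 == (((c' / ts : Nat) : Int), ((r' / ts : Nat) : Int))) = none := by
        apply find?_eq_none_of_not_mem_keys
        rw [← hkey]
        exact (List.nodup_cons.mp hnd).1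
      rw [hfind]
      dsimp only
      -- the head tile wrote exactly this cell
      have hx : p.1.1.toNat = c' / ts := by
        have : p.1.1 = ((c' / ts : Nat) : Int) := by rw [hkey]
        omega
      have hy : p.1.2.toNat = r' / ts := by
        have : p.1.2 = ((r' / ts : Nat) : Int) := by rw [hkey]
        omega
      have hyy : p.1.2.toNat * ts = ts * (r' / ts) := by rw [hy, Nat.mul_comm]
      have hxx : p.1.1.toNat * ts = ts * (c' / ts) := by rw [hx, Nat.mul_comm]
      unfold writeNat
      rw [tcell r' c']
      rw [if_pos ?_]
      · congr 2 <;> omega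
      · refine ⟨by omega, by omega, by omega, by omega, hr, hc⟩
    · have hbeq : (p.1 == (((c' / ts : Nat) : Int), ((r' / ts : Nat) : Int))) = false :=
        beq_eq_false_iff_ne.mpr hkey
      rw [hbeq]
      cases hfind : L.find? (fun q => q.1 == (((c' / ts : Nat) : Int), ((r' / ts : Nat) : Int))) with
      | some q => rfl
      | none =>
        dsimp only
        unfold writeNat
        rw [tcell r' c']
        rw [if_neg ?_]
        intro hreg
        apply hkey
        have hx : p.1.1.toNat = c' / ts := by
          have h1 : p.1.1.toNat * ts ≤ c' := hreg.2.2.1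
          have h2 : c' < p.1.1.toNat * ts + ts := by
            have := hreg.2.2.2.1
            omega
          exact (Nat.div_eq_of_lt_le (by omega) (by rw [Nat.add_mul, Nat.one_mul]; omega)).symm
        have hy : p.1.2.toNat = r' / ts := by
          have h1 : p.1.2.toNat * ts ≤ r' := hreg.1
          have h2 : r' < p.1.2.toNat * ts + ts := hreg.2.1
          exact (Nat.div_eq_of_lt_le (by omega) (by rw [Nat.add_mul, Nat.one_mul]; omega)).symm
        have : p.1 = (p.1.1, p.1.2) := rfl
        rw [this]
        rw [show p.1.1 = ((c' / ts : Nat) : Int) by omega, show p.1.2 = ((r' / ts : Nat) : Int) by omega]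


theorem getD_take (row : List Int) (n m : Nat) (hm : m < n) :
    (row.take n).getD m 0 = row.getD m 0 := by
  by_cases h : m < row.length
  · rw [List.getD_eq_getElem _ 0 (by rw [List.length_take]; omega),
        List.getD_eq_getElem _ 0 h, List.getElem_take]
  · rw [List.getD_eq_default _ _ (by rw [List.length_take]; omega),
        List.getD_eq_default _ _ (by omega)]

def chunkG (get : Int → Int → Option (List (List Int))) (ts' : Nat) (yn jn xn : Nat) :
    List Int :=
  match get (xn : Int) (yn : Int) with
  | none => List.replicate ts' 0
  | some t => (t.getD jn []).take ts'

def rowG (get : Int → Int → Option (List (List Int))) (ts' W' : Nat) (yn jn : Nat) : List Int :=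
  (List.range W').flatMap (chunkG get ts' yn jn)

def bformG (get : Int → Int → Option (List (List Int))) (ts' W' H' : Nat) : List (List Int) :=
  (List.range H').flatMap (fun yn => (List.range ts').map (fun jn => rowG get ts' W' yn jn))

-- B's triple loop, reshaped into a flatMap normal form
theorem bloop (get : Int → Int → Option (List (List Int))) (ts' W' H' : Nat) :
    List.foldl (fun final y =>
      List.foldl (fun final j =>
        final ++ [List.foldl (fun row x =>
          match get x y with
          | none => row ++ List.replicate ts' 0
          | some tile => row ++ PySem.List.slice (PySem.List.pyGetD tile j []) none (some (ts' : Int)))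
          [] (List.map (fun (k : Nat) => (k : Int)) (List.range W'))])
        final (List.map (fun (k : Nat) => (k : Int)) (List.range ts')))
      [] (List.map (fun (k : Nat) => (k : Int)) (List.range H'))
    = bformG get ts' W' H' := by
  have hrow : ∀ (yn jn : Nat),
      List.foldl (fun row x =>
          match get x ((yn : Nat) : Int) with
          | none => row ++ List.replicate ts' 0
          | some tile => row ++ PySem.List.slice (PySem.List.pyGetD tile ((jn : Nat) : Int) []) none (some (ts' : Int)))
        [] (List.map (fun (k : Nat) => (k : Int)) (List.range W')) = rowG get ts' W' yn jn := by
    intro yn jn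
    rw [List.foldl_map]
    have hbody : (fun (row : List Int) (xn : Nat) =>
        match get ((xn : Nat) : Int) ((yn : Nat) : Int) with
        | none => row ++ List.replicate ts' 0
        | some tile => row ++ PySem.List.slice (PySem.List.pyGetD tile ((jn : Nat) : Int) []) none (some (ts' : Int)))
        = fun row xn => row ++ chunkG get ts' yn jn xn := by
      funext row xn
      unfold chunkG
      cases hg : get ((xn : Nat) : Int) ((yn : Nat) : Int) with
      | none => rfl
      | some t =>
        dsimp only
        rw [PySem.List.pyGetD_natCast, PySem.List.slice_to_natCast]
    rw [hbody, PySem.List.foldl_append_eq_flatMap, List.nil_append]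
    rfl
  rw [List.foldl_map]
  have houter : (fun (final : List (List Int)) (yn : Nat) =>
      List.foldl (fun final j =>
        final ++ [List.foldl (fun row x =>
          match get x ((yn : Nat) : Int) with
          | none => row ++ List.replicate ts' 0
          | some tile => row ++ PySem.List.slice (PySem.List.pyGetD tile j []) none (some (ts' : Int)))
          [] (List.map (fun (k : Nat) => (k : Int)) (List.range W'))])
        final (List.map (fun (k : Nat) => (k : Int)) (List.range ts')))
      = fun final yn => final ++ (List.range ts').map (fun jn => rowG get ts' W' yn jn) := by
    funext final yn
    rw [List.foldl_map]
    have hbody2 : (fun (final : List (List Int)) (jn : Nat) =>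
        final ++ [List.foldl (fun row x =>
          match get x ((yn : Nat) : Int) with
          | none => row ++ List.replicate ts' 0
          | some tile => row ++ PySem.List.slice (PySem.List.pyGetD tile ((jn : Nat) : Int) []) none (some (ts' : Int)))
          [] (List.map (fun (k : Nat) => (k : Int)) (List.range W'))])
        = fun final jn => final ++ [rowG get ts' W' yn jn] := by
      funext final jn
      rw [hrow yn jn]
    rw [hbody2, PySem.List.foldl_append_singleton_eq_map]
  rw [houter, PySem.List.foldl_append_eq_flatMap, List.nil_append]
  rfl

-- ===== VERDICT (by name: the statement is the Claim_ definition above) =====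
theorem glue_chessboards_spec : Claim_equal_glue_chessboards := by
  unfold Claim_equal_glue_chessboards
  intro result ts _ hpre
  unfold Spec_glue_chessboards
  obtain ⟨hne, hneg, hshape⟩ := hpre
  simp only [glue_chessboards, glue_chessboards_alt]
  set L := result.map (fun p => ((p.1, p.2.1), p.2.2)) with hL
  set d := PySem.Dict.ofList L with hd
  set xs := d.keys.map (fun k => k.1) with hxs
  set ys := d.keys.map (fun k => k.2) with hys
  cases hmx : PySem.List.max? xs (fun v => v) with
  | none => cases hmy : PySem.List.max? ys (fun v => v) <;> rfl
  | some mx =>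
    cases hmy : PySem.List.max? ys (fun v => v) with
    | none => rfl
    | some my =>
      dsimp only
      have hkeys : d.keys = PySem.Set.ofList (L.map (fun p => p.1)) := by
        have h1 := PySem.Dict.keys_foldl_insert_key (κ := Int × Int) (ν := List (List Int))
          L (fun p => p.1) (fun _ p => p.2) PySem.Dict.empty
        exact h1.trans (by rw [show (PySem.Dict.empty : PySem.Dict (Int × Int) (List (List Int))).keys = [] from rfl, PySem.Set.update_nil_left])
      have hmemkeys : ∀ k, k ∈ d.keys ↔ ∃ q ∈ result, (q.1, q.2.1) = k := by
        intro k
        rw [hkeys, PySem.Set.mem_ofList, hL]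
        simp [List.mem_map]
      have hmymax : ∀ v ∈ ys, v ≤ my := fun v hv => PySem.List.max?_isMax hmy v hv
      have hmxmax : ∀ v ∈ xs, v ≤ mx := fun v hv => PySem.List.max?_isMax hmx v hv
      by_cases hts : 0 < ts
      · -- 0 < tile_size : full grid case
        have hts0 : (0:Int) ≤ ts := le_of_lt hts
        set ts' := ts.toNat with hts'
        have htsN : 0 < ts' := by omega
        have htsc : ts = (ts' : Int) := by omega
        have hitems : ∀ p ∈ d.items, 0 ≤ p.1.1 ∧ 0 ≤ p.1.2 ∧ ts ≤ (p.2.length : Int) ∧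
            ∀ row ∈ p.2.take ts', ts ≤ (row.length : Int) := fun p hp => hshape p hp hts
        have hnn : ∀ p ∈ d.items, 0 ≤ p.1.1 ∧ 0 ≤ p.1.2 :=
          fun p hp => ⟨(hitems p hp).1, (hitems p hp).2.1⟩
        have hkeysitems : d.keys = d.items.map (fun x => x.1) := rfl
        have hxsm : ∀ v ∈ xs, ∃ p ∈ d.items, p.1.1 = v := by
          intro v hv
          rw [hxs, hkeysitems] at hv
          obtain ⟨k, hk, rfl⟩ := List.mem_map.mp hv
          obtain ⟨p, hp, rfl⟩ := List.mem_map.mp hk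
          exact ⟨p, hp, rfl⟩
        have hysm : ∀ v ∈ ys, ∃ p ∈ d.items, p.1.2 = v := by
          intro v hv
          rw [hys, hkeysitems] at hv
          obtain ⟨k, hk, rfl⟩ := List.mem_map.mp hv
          obtain ⟨p, hp, rfl⟩ := List.mem_map.mp hk
          exact ⟨p, hp, rfl⟩
        have hmx0 : 0 ≤ mx := by
          obtain ⟨p, hp, he⟩ := hxsm mx (PySem.List.max?_mem hmx)
          have := (hnn p hp).1
          omega
        have hmy0 : 0 ≤ my := by
          obtain ⟨p, hp, he⟩ := hysm my (PySem.List.max?_mem hmy)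
          have := (hnn p hp).2
          omega
        set W' := (mx + 1).toNat with hW'
        set H' := (my + 1).toNat with hH'
        have hWc : ((mx + 1) * ts).toNat = W' * ts' := by
          have key : ((W' * ts' : Nat) : Int) = (mx + 1) * ts := by
            push_cast
            rw [hW', hts', Int.toNat_of_nonneg (by omega), Int.toNat_of_nonneg hts0]
          omega
        have hHc : ((my + 1) * ts).toNat = H' * ts' := by
          have key : ((H' * ts' : Nat) : Int) = (my + 1) * ts := by
            push_cast
            rw [hH', hts', Int.toNat_of_nonneg (by omega), Int.toNat_of_nonneg hts0]
          omega
        -- A side: switch to the Nat-indexed writes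
        rw [hWc, hHc,
          PySem.List.foldl_congr_mem d.items (writeTileA ts) (writeNat ts') _
            (fun acc p hp => writeTileA_eq_writeNat ts hts0 acc p (hnn p hp).1 (hnn p hp).2)]
        set G0 := List.replicate (H' * ts') (List.replicate (W' * ts') (0 : Int)) with hG0
        have hnd : (d.items.map (fun p => p.1)).Nodup := PySem.Dict.nodup_keys_ofList L
        obtain ⟨alen, arow, acell⟩ := items_foldl ts' htsN d.items G0 hnd hnn
        have hG0len : G0.length = H' * ts' := by rw [hG0, List.length_replicate]
        have hG0row : ∀ r, r < H' * ts' → G0.getD r [] = List.replicate (W' * ts') (0 : Int) := by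
          intro r hr
          rw [hG0]
          exact List.getD_replicate _ hr
        -- B side: normal form via bloop
        rw [show ((my + 1) : Int) = ((H' : Nat) : Int) by omega,
            show ((mx + 1) : Int) = ((W' : Nat) : Int) by omega, htsc]
        simp only [PySem.List.pyRange_zero_nat]
        rw [bloop (fun x y => d.get? (x, y)) ts' W' H']
        -- elementwise comparison
        have hchunklen : ∀ yn jn xn, jn < ts' →
            (chunkG (fun x y => d.get? (x, y)) ts' yn jn xn).length = ts' := by
          intro yn jn xn hjn
          unfold chunkG
          dsimp only
          cases hg : d.get? (((xn : Nat) : Int), ((yn : Nat) : Int)) with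
          | none => rw [List.length_replicate]
          | some t =>
            dsimp only
            rw [List.length_take]
            have hmem := PySem.Dict.mem_items_of_get?_eq_some d hg
            obtain ⟨_, _, htl, hrows⟩ := hitems _ hmem
            dsimp only at htl hrows
            have hjt : jn < t.length := by omega
            have hmemtake : t[jn] ∈ t.take ts' := by
              have h1 : jn < (t.take ts').length := by rw [List.length_take]; omega
              have h2 := List.getElem_take (xs := t) (j := ts') (i := jn) (h := h1)
              rw [← h2]
              exact List.getElem_mem h1
            have hb := hrows _ hmemtake
            rw [List.getD_eq_getElem t [] hjt]
            omega
        have hrowlen : ∀ yn jn, jn < ts' →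
            (rowG (fun x y => d.get? (x, y)) ts' W' yn jn).length = W' * ts' := by
          intro yn jn hjn
          exact (blockGetD 0 _ ts' (fun k => hchunklen yn jn k hjn) W').1
        have hrowget : ∀ yn jn c, jn < ts' → c < W' * ts' →
            (rowG (fun x y => d.get? (x, y)) ts' W' yn jn).getD c 0 =
              (chunkG (fun x y => d.get? (x, y)) ts' yn jn (c / ts')).getD (c % ts') 0 := by
          intro yn jn c hjn hc
          exact (blockGetD 0 _ ts' (fun k => hchunklen yn jn k hjn) W').2 c hc
        have hBlen : (bformG (fun x y => d.get? (x, y)) ts' W' H').length = H' * ts' :=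
          (blockGetD [] _ ts' (fun k => by rw [List.length_map, List.length_range]) H').1
        have hBget : ∀ r, r < H' * ts' →
            (bformG (fun x y => d.get? (x, y)) ts' W' H').getD r [] =
              rowG (fun x y => d.get? (x, y)) ts' W' (r / ts') (r % ts') := by
          intro r hr
          unfold bformG
          rw [(blockGetD [] _ ts' (fun k => by rw [List.length_map, List.length_range]) H').2 r hr]
          exact getD_map_range' [] _ ts' (r % ts') (Nat.mod_lt _ htsN)
        refine eq_of_getD [] _ _ (by rw [alen, hG0len, hBlen]) ?_
        intro r hr
        have hrN : r < H' * ts' := by rwa [alen, hG0len] at hr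
        rw [hBget r hrN]
        have harl : ((d.items.foldl (writeNat ts') G0).getD r []).length = W' * ts' := by
          rw [arow r, hG0row r hrN, List.length_replicate]
        refine eq_of_getD 0 _ _ (by rw [harl, hrowlen _ _ (Nat.mod_lt _ htsN)]) ?_
        intro c hc
        have hcN : c < W' * ts' := by rwa [harl] at hc
        rw [hrowget _ _ c (Nat.mod_lt _ htsN) hcN]
        show cellGet _ r c = _
        rw [acell r c (by rwa [hG0len]) (by rw [hG0row r hrN, List.length_replicate]; exact hcN)]
        have hgetdef : d.get? (((c / ts' : Nat) : Int), ((r / ts' : Nat) : Int)) =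
            Option.map (fun p => p.2)
              (d.items.find? (fun p => p.1 == (((c / ts' : Nat) : Int), ((r / ts' : Nat) : Int)))) := rfl
        unfold chunkG
        dsimp only
        cases hf : d.items.find? (fun p => p.1 == (((c / ts' : Nat) : Int), ((r / ts' : Nat) : Int))) with
        | some p =>
          rw [show d.get? (((c / ts' : Nat) : Int), ((r / ts' : Nat) : Int)) = some p.2 by
            rw [hgetdef, hf]
            rfl]
          dsimp only
          rw [getD_take _ ts' _ (Nat.mod_lt _ htsN)]
        | none =>
          rw [show d.get? (((c / ts' : Nat) : Int), ((r / ts' : Nat) : Int)) = none by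
            rw [hgetdef, hf]
            rfl]
          dsimp only
          rw [List.getD_replicate _ (Nat.mod_lt _ htsN)]
          unfold cellGet
          rw [hG0row r hrN, List.getD_replicate _ hcN]
      · -- tile_size ≤ 0 : both sides are []
        have hwid : ∀ g it, writeTileA ts g it = g := by
          intro g it
          unfold writeTileA
          rw [PySem.List.pyRange_one_eq_nil (by omega : ts ≤ (0:Int))]
          rfl
        rw [PySem.List.foldl_congr_mem d.items (writeTileA ts) (fun g _ => g) _
          (fun acc x _ => hwid acc x), List.foldl_fixed]
        have hB : ∀ (acc : List (List Int)) (y : Int), List.foldl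
            (fun final j =>
              final ++
                [List.foldl
                    (fun row x =>
                      match d.get? (x, y) with
                      | none => row ++ List.replicate ts.toNat 0
                      | some tile => row ++ PySem.List.slice (PySem.List.pyGetD tile j []) none (some ts))
                    [] (PySem.List.pyRange 0 (mx + 1))])
            acc (PySem.List.pyRange 0 ts) = acc := by
          intro acc y
          rw [PySem.List.pyRange_one_eq_nil (by omega : ts ≤ (0:Int))]
          rfl
        rw [PySem.List.foldl_congr_mem _ _ (fun acc _ => acc) _
          (fun acc y _ => hB acc y), List.foldl_fixed]
        have hprod : ((my + 1) * ts).toNat = 0 := by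
          rcases eq_or_lt_of_le (by omega : ts ≤ 0) with h0 | hlt
          · rw [h0, Int.mul_zero]
            rfl
          · obtain ⟨p, hp, hy⟩ := hneg hlt
            have hk : (p.1, p.2.1) ∈ d.keys := (hmemkeys _).mpr ⟨p, hp, rfl⟩
            have hyys : p.2.1 ∈ ys := by
              rw [hys]
              exact List.mem_map.mpr ⟨(p.1, p.2.1), hk, rfl⟩
            have hmy1 : -1 ≤ my := le_trans hy (hmymax _ hyys)
            have : (my + 1) * ts ≤ 0 := mul_nonpos_iff.mpr (Or.inl ⟨by omega, by omega⟩)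
            omega
        rw [hprod, List.replicate_zero]
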